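-- pv_equiv track=rewrite | github.com/sarthakj1904/code-to-brd-system | src/lambda/workflow-orchestrator/workflow_orchestrator.py | extract_brd_sections
-- ===== SOURCE A (Python) =====
-- from typing import Dict, List, Any
--
-- def extract_brd_sections(brd_content: str) -> Dict[str, str]:
--     """Extract sections from BRD content"""
--     sections = {}
--     current_section = None
--     current_content = []
--
--     lines = brd_content.split('\n')
--     for line in lines:
--         line = line.strip()
--         if line and (line.isupper() or line.startswith('#')):
--             if current_section:
--                 sections[current_section] = '\n'.join(current_content)
--             current_section = line
--             current_content = []
--         else:
--             current_content.append(line)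
--
--     if current_section:
--         sections[current_section] = '\n'.join(current_content)
--
--     return sections
-- ===== SOURCE B (Python) =====
-- def extract_brd_sections(brd_content: str):
--     """Extract sections from BRD content (segment-scan rewrite)."""
--     lines = [l.strip() for l in brd_content.split('\n')]
--
--     def is_header(l):
--         return bool(l) and (l.isupper() or l.startswith('#'))
--
--     sections = {}
--     n = len(lines)
--     i = 0
--     while i < n:
--         if not is_header(lines[i]):
--             i += 1
--             continue
--         header = lines[i]
--         j = i + 1
--         while j < n and not is_header(lines[j]):
--             j += 1
--         sections[header] = '\n'.join(lines[i + 1:j])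
--         i = j
--     return sections
-- ===== Notes on version B (the rewrite author's own statement) =====
-- stated objective: alternative
-- what changed: Replaces A's one-pass accumulator state machine (pending header + content buffer flushed at the next header / end) by a segment scan that strips all lines up front, then for each header scans ahead to the next header and emits that slice directly, with no pending/flush state.
import Mathlib
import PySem

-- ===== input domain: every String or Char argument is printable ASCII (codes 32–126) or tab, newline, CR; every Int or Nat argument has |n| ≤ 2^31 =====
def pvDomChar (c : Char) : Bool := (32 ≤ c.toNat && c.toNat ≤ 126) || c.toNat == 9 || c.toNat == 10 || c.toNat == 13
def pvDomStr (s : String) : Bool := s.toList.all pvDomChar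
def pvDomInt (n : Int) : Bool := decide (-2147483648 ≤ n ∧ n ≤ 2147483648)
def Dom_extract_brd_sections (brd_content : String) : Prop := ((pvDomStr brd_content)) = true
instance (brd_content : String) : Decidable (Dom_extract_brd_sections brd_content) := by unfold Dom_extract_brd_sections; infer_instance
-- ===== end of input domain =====

-- B replaces A's flush-on-next-header accumulator state machine by a direct segment scan
-- (find a header, scan forward to the next header, emit the slice); objective: alternative.

-- shared primitive: Python str.isupper() on the ASCII domain
-- (some cased character exists and no cased character is lowercase; exact on ASCII,
--  where the cased characters are exactly the letters)
def pyStrIsupper (s : String) : Bool :=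
  s.toList.any PySem.Chars.isupper && s.toList.all (fun c => !PySem.Chars.islower c)

-- the header test `line and (line.isupper() or line.startswith('#'))`, used verbatim by both Pythons
def isHeader (l : String) : Bool :=
  (l != "") && (pyStrIsupper l || PySem.Str.startswith l "#")

-- ===== PORT A =====
-- A's loop body after `line = line.strip()`
def stepN (st : PySem.Dict String String × Option String × List String) (line : String) :
    PySem.Dict String String × Option String × List String :=
  if isHeader line then
    match st.2.1 with
    | some cs => (st.1.insert cs (PySem.Str.join "\n" st.2.2), some line, ([] : List String))
    | none => (st.1, some line, ([] : List String))
  else (st.1, st.2.1, st.2.2 ++ [line])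

-- A's loop body: strip, then the branch
def stepA (st : PySem.Dict String String × Option String × List String) (line : String) :
    PySem.Dict String String × Option String × List String :=
  stepN st (PySem.Str.strip line)

-- the trailing `if current_section: sections[current_section] = ...`
def flushA (st : PySem.Dict String String × Option String × List String) :
    PySem.Dict String String :=
  match st.2.1 with
  | some cs => st.1.insert cs (PySem.Str.join "\n" st.2.2)
  | none => st.1

def extract_brd_sections (brd_content : String) : List (String × String) :=
  (flushA (((PySem.Str.split? brd_content "\n").getD []).foldl stepA
      (PySem.Dict.empty, none, ([] : List String)))).items

-- ===== PORT B =====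
-- Source B's inner `while j < n and not is_header(lines[j]): j += 1` scan:
-- returns (the scanned non-header lines, the remainder starting at the next header)
def scanB : List String → List String × List String
  | [] => ([], [])
  | l :: rest =>
    if isHeader l then ([], l :: rest)
    else
      let p := scanB rest
      (l :: p.1, p.2)

theorem scanB_snd_length_le (ls : List String) : (scanB ls).2.length ≤ ls.length := by
  induction ls with
  | nil => simp [scanB]
  | cons l rest ih =>
    simp only [scanB]
    split
    · simp
    · simpa using Nat.le_succ_of_le ih

-- Source B's outer `while i < n` loop, as recursion on the remaining lines
def goB (sections : PySem.Dict String String) : List String → PySem.Dict String String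
  | [] => sections
  | l :: rest =>
    if isHeader l then
      goB (sections.insert l (PySem.Str.join "\n" (scanB rest).1)) (scanB rest).2
    else
      goB sections rest
  termination_by ls => ls.length
  decreasing_by
  all_goals simp only [List.length_cons]
  · have := scanB_snd_length_le rest; omega
  · omega

def extract_brd_sections_alt (brd_content : String) : List (String × String) :=
  (goB PySem.Dict.empty (((PySem.Str.split? brd_content "\n").getD []).map PySem.Str.strip)).items

-- ===== PRECONDITION & SPEC =====
def Spec_extract_brd_sections (brd_content : String) (out : List (String × String)) : Prop := out = extract_brd_sections_alt brd_content
instance (brd_content : String) (out : List (String × String)) : Decidable (Spec_extract_brd_sections brd_content out) := by unfold Spec_extract_brd_sections; infer_instance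

-- ===== CLAIM (what is proved, stated in full; the proofs are below) =====
def Claim_equal_extract_brd_sections : Prop := ∀ (brd_content : String), Dom_extract_brd_sections brd_content → Spec_extract_brd_sections brd_content (extract_brd_sections brd_content)

-- ===== LEMMAS AND PROOFS =====

-- with a pending section h and buffered content c, A's fold flushes h with c plus the
-- non-header lines up to the next header, then continues like B on the remainder
theorem lemSome (ls : List String) :
    ∀ (d : PySem.Dict String String) (h : String) (c : List String),
      flushA (ls.foldl stepN (d, some h, c)) =
        goB (d.insert h (PySem.Str.join "\n" (c ++ (scanB ls).1))) (scanB ls).2 := by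
  induction ls with
  | nil => intro d h c; simp [scanB, flushA, goB]
  | cons l rest ih =>
    intro d h c
    by_cases hl : isHeader l = true
    · simp only [List.foldl_cons, stepN, hl, if_pos, scanB, goB]
      rw [ih]
      simp
    · simp only [List.foldl_cons, stepN, hl, if_neg, scanB, Bool.not_eq_true] at *
      rw [ih]
      simp

-- with no pending section, A's fold from dictionary d computes goB d
theorem lemNone (ls : List String) :
    ∀ (d : PySem.Dict String String) (c : List String),
      flushA (ls.foldl stepN (d, none, c)) = goB d ls := by
  induction ls with
  | nil => intro d c; simp [flushA, goB]
  | cons l rest ih =>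
    intro d c
    by_cases hl : isHeader l = true
    · simp only [List.foldl_cons, stepN, hl, if_pos, goB]
      rw [lemSome]
      simp
    · simp only [List.foldl_cons, stepN, hl, goB]
      simp only [Bool.false_eq_true, if_false]
      exact ih d (c ++ [l])

-- ===== VERDICT (by name: the statement is the Claim_ definition above) =====
theorem extract_brd_sections_spec : Claim_equal_extract_brd_sections := by
  intro brd_content _
  unfold Spec_extract_brd_sections extract_brd_sections extract_brd_sections_alt
  have hmap : (((PySem.Str.split? brd_content "\n").getD []).map PySem.Str.strip).foldl stepN
      (PySem.Dict.empty, none, ([] : List String)) =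
      ((PySem.Str.split? brd_content "\n").getD []).foldl stepA
      (PySem.Dict.empty, none, ([] : List String)) := by
    rw [List.foldl_map]
    rfl
  rw [← hmap, lemNone]
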